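-- pv_equiv track=rewrite | github.com/ryanjmccall/swe-cheatsheet | swe-cheatsheet/algorithms/fb/largest_triple_products.py | findMaxProduct
-- ===== SOURCE A (Python) =====
-- import heapq
-- from functools import reduce
--
-- def findMaxProduct(arr):
--     if len(arr) <= 2:
--         return [-1] * len(arr)
--
--     products = [1] * len(arr)
--     products[0] = products[1] = -1
--     maxes = []
--     heapq.heappush(maxes, arr[0])
--     heapq.heappush(maxes, arr[1])
--     func = lambda x, y: x * y
--     for i, val in enumerate(arr[2:], start=2):
--         heapq.heappush(maxes, val)
--         products[i] = reduce(func, heapq.nlargest(3, maxes))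
--
--     return products
-- ===== SOURCE B (Python) =====
-- def findMaxProduct(arr):
--     n = len(arr)
--     if n <= 2:
--         return [-1] * n
--     t0, t1, t2 = sorted(arr[:3])
--     res = [-1, -1, t0 * t1 * t2]
--     for v in arr[3:]:
--         if v > t0:
--             if v > t2:
--                 t0, t1, t2 = t1, t2, v
--             elif v > t1:
--                 t0, t1 = t1, v
--             else:
--                 t0 = v
--         res.append(t0 * t1 * t2)
--     return res
-- ===== Notes on version B (the rewrite author's own statement) =====
-- stated objective: faster
-- what changed: Instead of pushing every element onto a growing heap and recomputing nlargest(3) over the whole heap at each index, B maintains only the current three largest values in a sorted triple and updates it in O(1) per element.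
import Mathlib
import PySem

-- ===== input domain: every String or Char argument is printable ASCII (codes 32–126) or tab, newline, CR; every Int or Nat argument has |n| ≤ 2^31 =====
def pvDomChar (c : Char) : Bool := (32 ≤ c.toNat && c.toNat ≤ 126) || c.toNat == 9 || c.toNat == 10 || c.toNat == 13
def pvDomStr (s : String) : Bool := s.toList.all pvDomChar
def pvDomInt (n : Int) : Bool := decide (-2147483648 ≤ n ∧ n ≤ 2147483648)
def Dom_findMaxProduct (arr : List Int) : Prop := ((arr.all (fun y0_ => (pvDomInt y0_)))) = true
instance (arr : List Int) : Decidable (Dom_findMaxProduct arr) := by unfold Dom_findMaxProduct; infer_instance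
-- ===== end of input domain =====

-- B replaces A's grow-a-heap-and-rescan (nlargest(3) over all elements seen so far, at every index)
-- with an O(1)-per-element update of the current top-3 triple.

-- ===== PORT A =====
-- heapq.heappush / heapq.nlargest: the heap is modeled by its CONTENTS (a list); heappush adds the
-- element, and nlargest(3, it) is ported by its documented contract sorted(it, reverse=True)[:3],
-- which is exact here (Int values: only the multiset of heap contents determines nlargest's value).
def pyNlargest3 (xs : List Int) : List Int :=
  (PySem.List.sorted xs (fun x => x) true).take 3

-- reduce(mul, l) for a nonempty l; A only applies it to 3-element lists ([] is unreachable there).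
def pyReduceMul (l : List Int) : Int :=
  match l with
  | [] => 0
  | x :: ys => ys.foldl (· * ·) x

-- the for-loop: for i, val in enumerate(arr[2:], start=2): heappush; products[i] = reduce(...)
def findMaxProductLoop (vals : List Int) (i : Int) (products maxes : List Int) : List Int :=
  match vals with
  | [] => products
  | v :: vs =>
      let maxes' := v :: maxes
      findMaxProductLoop vs (i + 1)
        (PySem.List.pySetD products i (pyReduceMul (pyNlargest3 maxes'))) maxes'

def findMaxProduct (arr : List Int) : List Int :=
  if arr.length ≤ 2 then List.replicate arr.length (-1)
  else
    let products0 := List.replicate arr.length (1 : Int)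
    let products1 := PySem.List.pySetD (PySem.List.pySetD products0 0 (-1)) 1 (-1)
    let maxes0 : List Int := [PySem.List.pyGetD arr 0 0, PySem.List.pyGetD arr 1 0]
    findMaxProductLoop (PySem.List.slice arr (some 2) none) 2 products1 maxes0

-- ===== PORT B =====
def findMaxProductAltLoop (vals : List Int) (t0 t1 t2 : Int) (res : List Int) : List Int :=
  match vals with
  | [] => res
  | v :: vs =>
      let s : Int × Int × Int :=
        if v > t0 then
          if v > t2 then (t1, t2, v)
          else if v > t1 then (t1, v, t2)
          else (v, t1, t2)
        else (t0, t1, t2)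
      findMaxProductAltLoop vs s.1 s.2.1 s.2.2 (res ++ [s.1 * s.2.1 * s.2.2])

def findMaxProduct_alt (arr : List Int) : List Int :=
  if arr.length ≤ 2 then List.replicate arr.length (-1)
  else
    let t := PySem.List.sorted (PySem.List.slice arr none (some 3)) (fun x => x) false
    let t0 := t.getD 0 0
    let t1 := t.getD 1 0
    let t2 := t.getD 2 0
    findMaxProductAltLoop (PySem.List.slice arr (some 3) none) t0 t1 t2
      [-1, -1, t0 * t1 * t2]

-- ===== PRECONDITION & SPEC =====
def Spec_findMaxProduct (arr : List Int) (out : List Int) : Prop := out = findMaxProduct_alt arr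
instance (arr : List Int) (out : List Int) : Decidable (Spec_findMaxProduct arr out) := by unfold Spec_findMaxProduct; infer_instance

-- ===== CLAIM (what is proved, stated in full; the proofs are below) =====
def Claim_equal_findMaxProduct : Prop := ∀ (arr : List Int), Dom_findMaxProduct arr → Spec_findMaxProduct arr (findMaxProduct arr)

-- ===== LEMMAS AND PROOFS =====

theorem desc_sorted_eq (ys xs : List Int) (h1 : ys.Perm xs)
    (h2 : ys.Pairwise (fun a b : Int => b ≤ a)) :
    PySem.List.sorted xs (fun x => x) true = ys := by
  have hp : (PySem.List.sorted xs (fun x => x) true).Perm ys :=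
    (PySem.List.sorted_perm xs (fun x => x) true).trans h1.symm
  have hs : (PySem.List.sorted xs (fun x => x) true).Pairwise (fun a b : Int => b ≤ a) :=
    PySem.List.sorted_pairwise_rev xs (fun x => x)
  exact hp.eq_of_pairwise (by intro a b _ _ h h2; omega) hs h2
def Top3Inv (p : List Int) (t0 t1 t2 : Int) : Prop :=
  t0 ≤ t1 ∧ t1 ≤ t2 ∧ ∃ rest : List Int, (t2 :: t1 :: t0 :: rest).Perm p ∧ ∀ x ∈ rest, x ≤ t0
theorem nlargest3_of_inv (p : List Int) (t0 t1 t2 : Int) (h : Top3Inv p t0 t1 t2) :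
    pyNlargest3 p = [t2, t1, t0] := by
  obtain ⟨h01, h12, rest, hperm, hle⟩ := h
  have hsr : PySem.List.sorted p (fun x => x) true
      = t2 :: t1 :: t0 :: PySem.List.sorted rest (fun x => x) true := by
    apply desc_sorted_eq
    · exact ((PySem.List.sorted_perm rest (fun x => x) true).cons t0 |>.cons t1 |>.cons t2).trans hperm
    · have hr : (PySem.List.sorted rest (fun x => x) true).Pairwise (fun a b : Int => b ≤ a) :=
        PySem.List.sorted_pairwise_rev rest (fun x => x)
      have hmem : ∀ x ∈ PySem.List.sorted rest (fun x => x) true, x ≤ t0 := by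
        intro x hx
        exact hle x ((PySem.List.mem_sorted rest (fun x => x) true x).mp hx)
      refine List.pairwise_cons.mpr ⟨?_, List.pairwise_cons.mpr ⟨?_, List.pairwise_cons.mpr ⟨?_, hr⟩⟩⟩
      · intro b hb
        simp only [List.mem_cons] at hb
        rcases hb with rfl | rfl | hb
        · exact h12
        · exact le_trans h01 h12
        · exact le_trans (le_trans (hmem b hb) h01) h12
      · intro b hb
        simp only [List.mem_cons] at hb
        rcases hb with rfl | hb
        · exact h01
        · exact le_trans (hmem b hb) h01
      · exact hmem
  simp [pyNlargest3, hsr]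
theorem inv_step (p : List Int) (t0 t1 t2 v : Int) (h : Top3Inv p t0 t1 t2) :
    Top3Inv (v :: p)
      (if v > t0 then (if v > t2 then (t1, t2, v) else if v > t1 then (t1, v, t2) else (v, t1, t2))
       else (t0, t1, t2)).1
      (if v > t0 then (if v > t2 then (t1, t2, v) else if v > t1 then (t1, v, t2) else (v, t1, t2))
       else (t0, t1, t2)).2.1
      (if v > t0 then (if v > t2 then (t1, t2, v) else if v > t1 then (t1, v, t2) else (v, t1, t2))
       else (t0, t1, t2)).2.2 := by
  obtain ⟨h01, h12, rest, hperm, hle⟩ := h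
  split_ifs with hv0 hv2 hv1 <;> dsimp only
  · -- v > t2 : triple (t1,t2,v), rest' = t0::rest
    refine ⟨h12, by omega, t0 :: rest, hperm.cons v, ?_⟩
    intro x hx
    simp only [List.mem_cons] at hx
    rcases hx with rfl | hx
    · exact h01
    · exact le_trans (hle x hx) h01
  · -- t1 < v ≤ t2 : triple (t1,v,t2)
    refine ⟨by omega, by omega, t0 :: rest, ?_, ?_⟩
    · exact (List.Perm.swap v t2 _).trans (hperm.cons v)
    · intro x hx
      simp only [List.mem_cons] at hx
      rcases hx with rfl | hx
      · exact h01
      · exact le_trans (hle x hx) h01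
  · -- t0 < v ≤ t1 : triple (v,t1,t2)
    refine ⟨by omega, h12, t0 :: rest, ?_, ?_⟩
    · exact ((List.Perm.swap v t1 _).cons t2).trans ((List.Perm.swap v t2 _).trans (hperm.cons v))
    · intro x hx
      simp only [List.mem_cons] at hx
      rcases hx with rfl | hx
      · exact le_of_lt hv0
      · exact le_trans (hle x hx) (le_of_lt hv0)
  · -- v ≤ t0 : unchanged, rest' = v::rest
    refine ⟨h01, h12, v :: rest, ?_, ?_⟩
    · exact (((List.Perm.swap v t0 rest).cons t1).cons t2).trans
        (((List.Perm.swap v t1 _).cons t2).trans ((List.Perm.swap v t2 _).trans (hperm.cons v)))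
    · intro x hx
      simp only [List.mem_cons] at hx
      rcases hx with rfl | hx
      · omega
      · exact hle x hx
theorem loops_agree (vals : List Int) (p done : List Int) (t0 t1 t2 : Int)
    (h : Top3Inv p t0 t1 t2) :
    findMaxProductLoop vals (done.length : Int) (done ++ List.replicate vals.length 1) p
      = findMaxProductAltLoop vals t0 t1 t2 done := by
  induction vals generalizing p done t0 t1 t2 with
  | nil => simp [findMaxProductLoop, findMaxProductAltLoop]
  | cons v vs ih =>
    have hinv := inv_step p t0 t1 t2 v h
    set s := (if v > t0 then (if v > t2 then (t1, t2, v) else if v > t1 then (t1, v, t2) else (v, t1, t2))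
       else (t0, t1, t2)) with hs
    have hnl : pyNlargest3 (v :: p) = [s.2.2, s.2.1, s.1] :=
      nlargest3_of_inv _ _ _ _ hinv
    have hset : PySem.List.pySetD (done ++ List.replicate (v :: vs).length 1)
        (done.length : Int) (pyReduceMul (pyNlargest3 (v :: p)))
        = (done ++ [s.1 * s.2.1 * s.2.2]) ++ List.replicate vs.length 1 := by
      rw [hnl]
      simp [pyReduceMul, PySem.List.pySetD_natCast, List.replicate_succ]
      ring
    calc findMaxProductLoop (v :: vs) (done.length : Int) (done ++ List.replicate (v :: vs).length 1) p
        = findMaxProductLoop vs ((done.length : Int) + 1)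
            ((done ++ [s.1 * s.2.1 * s.2.2]) ++ List.replicate vs.length 1) (v :: p) := by
          rw [findMaxProductLoop, hset]
      _ = findMaxProductAltLoop vs s.1 s.2.1 s.2.2 (done ++ [s.1 * s.2.1 * s.2.2]) := by
          have : ((done ++ [s.1 * s.2.1 * s.2.2]).length : Int) = (done.length : Int) + 1 := by
            simp
          rw [← this]
          exact ih (v :: p) (done ++ [s.1 * s.2.1 * s.2.2]) s.1 s.2.1 s.2.2 hinv
      _ = findMaxProductAltLoop (v :: vs) t0 t1 t2 done := by
          rw [findMaxProductAltLoop]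
theorem findMaxProduct_eq_alt (arr : List Int) : findMaxProduct arr = findMaxProduct_alt arr := by
  unfold findMaxProduct findMaxProduct_alt
  by_cases hlen : arr.length ≤ 2
  · simp [hlen]
  · simp only [hlen, if_false]
    obtain ⟨a, b, c, rest, rfl⟩ : ∃ a b c rest, arr = a :: b :: c :: rest := by
      match arr, hlen with
      | [], h => simp at h
      | [a], h => simp at h
      | [a, b], h => simp at h
      | a :: b :: c :: rest, _ => exact ⟨a, b, c, rest, rfl⟩
    have hslice3 : PySem.List.slice (a :: b :: c :: rest) none (some 3) = [a, b, c] := by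
      rw [PySem.List.slice_to]
      · simp [List.take]
      · norm_num
    have hlen3 : (PySem.List.sorted (PySem.List.slice (a :: b :: c :: rest) none (some 3)) (fun x => x) false).length = 3 := by
      rw [PySem.List.length_sorted, hslice3]
      rfl
    obtain ⟨t0, t1, t2, hts⟩ :=  List.length_eq_three.mp hlen3
    have hperm3 : ([t0, t1, t2] : List Int).Perm [a, b, c] := by
      rw [← hts, ← hslice3]
      exact PySem.List.sorted_perm _ _ _
    have hpair3 : ([t0, t1, t2] : List Int).Pairwise (· ≤ ·) := by
      have := PySem.List.sorted_pairwise (PySem.List.slice (a :: b :: c :: rest) none (some 3)) (fun x => x)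
      rw [hts] at this
      exact this
    have h01 : t0 ≤ t1 := by simp [List.pairwise_cons] at hpair3; omega
    have h12 : t1 ≤ t2 := by simp [List.pairwise_cons] at hpair3; omega
    have hinv : Top3Inv [c, a, b] t0 t1 t2 := by
      refine ⟨h01, h12, [], ?_, by simp⟩
      have h1 : ([t2, t1, t0] : List Int).Perm [a, b, c] := by
        have := (List.reverse_perm [t0, t1, t2]).trans hperm3
        simpa using this
      have h2 : ([a, b, c] : List Int).Perm [c, a, b] :=
        List.perm_append_comm (l₁ := [a, b]) (l₂ := [c])
      exact h1.trans h2
    have hX : pyReduceMul (pyNlargest3 [c, a, b]) = t0 * t1 * t2 := by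
      rw [nlargest3_of_inv _ _ _ _ hinv]
      simp [pyReduceMul]
      ring
    have hdrop2 : PySem.List.slice (a :: b :: c :: rest) (some 2) none = c :: rest := by
      rw [PySem.List.slice_from]
      · rfl
      · norm_num
    have hdrop3 : PySem.List.slice (a :: b :: c :: rest) (some 3) none = rest := by
      rw [PySem.List.slice_from]
      · rfl
      · norm_num
    have hmain := loops_agree rest [c, a, b] [-1, -1, t0 * t1 * t2] t0 t1 t2 hinv
    simp only [hdrop2, hdrop3, hts]
    have hprod1 : PySem.List.pySetD (PySem.List.pySetD (List.replicate (a :: b :: c :: rest).length (1 : Int)) 0 (-1)) 1 (-1)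
        = [-1, -1] ++ List.replicate (rest.length + 1) 1 := by
      simp [PySem.List.pySetD_of_nonneg, List.replicate_succ, List.set]
    rw [hprod1]
    rw [findMaxProductLoop]
    have hset2 : PySem.List.pySetD (([-1, -1] : List Int) ++ List.replicate (rest.length + 1) 1) 2
        (pyReduceMul (pyNlargest3 [c, a, b])) = [-1, -1, t0 * t1 * t2] ++ List.replicate rest.length 1 := by
      rw [hX]
      simp [PySem.List.pySetD_of_nonneg, List.replicate_succ, List.set]
    have hget0 : PySem.List.pyGetD (a :: b :: c :: rest) 0 0 = a := by simp [pysem]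
    have hget1 : PySem.List.pyGetD (a :: b :: c :: rest) 1 0 = b := by simp [pysem]
    rw [hget0, hget1, hset2]
    simpa using hmain

-- ===== VERDICT (by name: the statement is the Claim_ definition above) =====
theorem findMaxProduct_spec : Claim_equal_findMaxProduct := by
  intro arr _
  unfold Spec_findMaxProduct
  exact findMaxProduct_eq_alt arr
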